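-- pv_equiv track=rewrite | github.com/loadingsjy/algorithm | search/maxRunTime.py | maxRunTime2
-- ===== SOURCE A (Python) =====
-- def maxRunTime2(n: int, batteries: list[int]) -> int:
--     """那么要让 n 台电脑同时运行 x 分钟，充分必要条件是 n*x ≤ sum"""
--     """二分答案"""
--     l, r = 0, sum(batteries) // n
--     while l < r:
--         x = (l + r + 1) // 2
--         if n * x <= sum(min(b, x) for b in batteries):
--             l = x
--         else:
--             r = x - 1
--     return l
-- ===== SOURCE B (Python) =====
-- def maxRunTime2(n: int, batteries: list[int]) -> int:
--     """Greedy: sort descending; a battery holding more than the current fair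
--     share gets a computer of its own; the rest are shared evenly. The run
--     time is never negative, and the last shared pool is never given away."""
--     s = sum(batteries)
--     k = n
--     for b in sorted(batteries, reverse=True):
--         if k > 1 and b * k > s:
--             s -= b
--             k -= 1
--         else:
--             break
--     return max(s // k, 0)
-- ===== Notes on version B (the rewrite author's own statement) =====
-- stated objective: faster
-- what changed: Replaces A's binary search over the running time (which re-sums min(b,x) over all batteries at every probe) with sort-descending + greedy dedication of over-large batteries, finishing with one floor division clamped at 0.
-- outside the precondition, e.g. on maxRunTime2(1, [-2, 9, -5, 7]): A returns 0, B returns 9; on maxRunTime2(2, [17, 16, 16, -9, -9]): A returns 0, B returns 14; on maxRunTime2(0, [1]): A raises ZeroDivisionError, B raises ZeroDivisionError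
import Mathlib
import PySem

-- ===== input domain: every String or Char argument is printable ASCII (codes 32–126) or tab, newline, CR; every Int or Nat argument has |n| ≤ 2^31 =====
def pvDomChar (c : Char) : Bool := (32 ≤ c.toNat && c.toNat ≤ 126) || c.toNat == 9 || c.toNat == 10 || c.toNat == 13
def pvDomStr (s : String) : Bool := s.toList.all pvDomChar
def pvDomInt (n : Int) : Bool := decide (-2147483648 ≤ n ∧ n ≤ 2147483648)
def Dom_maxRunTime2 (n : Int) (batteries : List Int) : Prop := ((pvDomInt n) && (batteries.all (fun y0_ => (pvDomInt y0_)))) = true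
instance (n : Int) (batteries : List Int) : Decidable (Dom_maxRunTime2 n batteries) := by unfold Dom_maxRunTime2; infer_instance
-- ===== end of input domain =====

-- B replaces A's binary search on the answer by sort-descending + greedy removal of
-- over-large batteries (objective: faster, asymptotically).

-- ===== PORT A =====
-- sum(min(b, x) for b in batteries)
def pyMinSum (batteries : List Int) (x : Int) : Int :=
  (batteries.map (fun b => min b x)).sum

-- while l < r: x = (l+r+1)//2; if n*x <= sum(min(b,x)…): l = x else: r = x-1
def bsLoop (n : Int) (batteries : List Int) (l r : Int) : Int :=
  if h : l < r then
    let x := PySem.Int.floordiv (l + r + 1) 2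
    if n * x ≤ pyMinSum batteries x then bsLoop n batteries x r
    else bsLoop n batteries l (x - 1)
  else l
termination_by (r - l).toNat
decreasing_by
  · have hx := PySem.Int.floordiv_two_mid_bounds (lo := l + 1) (hi := r) (by omega)
    have : l + 1 + r = l + r + 1 := by ring
    rw [this] at hx
    omega
  · have hx := PySem.Int.floordiv_two_mid_bounds (lo := l + 1) (hi := r) (by omega)
    have : l + 1 + r = l + r + 1 := by ring
    rw [this] at hx
    omega

def maxRunTime2 (n : Int) (batteries : List Int) : Int :=
  bsLoop n batteries 0 (PySem.Int.floordiv batteries.sum n)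

-- ===== PORT B =====
-- for b in sorted(batteries, reverse=True): if k > 1 and b*k > s: s -= b; k -= 1 else: break
def gLoop (s k : Int) : List Int → Int
  | [] => PySem.Int.floordiv s k
  | b :: rest => if 1 < k ∧ s < b * k then gLoop (s - b) (k - 1) rest
                 else PySem.Int.floordiv s k

-- return max(s // k, 0)
def maxRunTime2_alt (n : Int) (batteries : List Int) : Int :=
  max (gLoop batteries.sum n (PySem.List.sorted batteries (fun x => x) true)) 0

-- ===== PRECONDITION & SPEC =====
-- Pre_ excludes n ≤ 0 (A raises ZeroDivisionError at n = 0) and lists holding a negative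
-- charge whose total and whose count of nonnegative charges both reach n: there A's binary
-- search runs over a non-monotone feasibility predicate and its result is an accident of
-- the probing order.
def Pre_maxRunTime2 (n : Int) (batteries : List Int) : Prop :=
  1 ≤ n ∧ ((∀ b ∈ batteries, 0 ≤ b) ∨ batteries.sum < n ∨
    ((batteries.countP (fun b => decide (0 ≤ b)) : Int) < n))
instance (n : Int) (batteries : List Int) : Decidable (Pre_maxRunTime2 n batteries) := by
  unfold Pre_maxRunTime2; infer_instance

def pvWitness_maxRunTime2 : Int × List Int := (2, [3, 1, 5])

def Spec_maxRunTime2 (n : Int) (batteries : List Int) (out : Int) : Prop := out = maxRunTime2_alt n batteries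
instance (n : Int) (batteries : List Int) (out : Int) : Decidable (Spec_maxRunTime2 n batteries out) := by unfold Spec_maxRunTime2; infer_instance

-- ===== CLAIM (what is proved, stated in full; the proofs are below) =====
def Claim_equal_maxRunTime2 : Prop := ∀ (n : Int) (batteries : List Int), Dom_maxRunTime2 n batteries → Pre_maxRunTime2 n batteries → Spec_maxRunTime2 n batteries (maxRunTime2 n batteries)

-- ===== LEMMAS AND PROOFS =====

theorem pyMinSum_le_sum (bs : List Int) (x : Int) : pyMinSum bs x ≤ bs.sum := by
  induction bs with
  | nil => simp [pyMinSum]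
  | cons b t ih =>
      simp only [pyMinSum, List.map_cons, List.sum_cons] at *
      have := min_le_left b x
      omega

theorem pyMinSum_zero (bs : List Int) (hb : ∀ b ∈ bs, 0 ≤ b) : pyMinSum bs 0 = 0 := by
  induction bs with
  | nil => simp [pyMinSum]
  | cons b t ih =>
      have hb0 : 0 ≤ b := hb b (by simp)
      have ht := ih (fun a ha => hb a (by simp [ha]))
      simp only [pyMinSum, List.map_cons, List.sum_cons] at *
      rw [min_eq_right hb0, ht]
      omega

theorem pyMinSum_perm {as bs : List Int} (h : as.Perm bs) (x : Int) :
    pyMinSum as x = pyMinSum bs x := by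
  unfold pyMinSum
  exact (h.map _).sum_eq

theorem pyMinSum_le_cnt_mul (bs : List Int) (x : Int) :
    pyMinSum bs x ≤ (bs.countP (fun b => decide (0 ≤ b)) : Int) * x := by
  induction bs with
  | nil => simp [pyMinSum]
  | cons b t ih =>
      simp only [pyMinSum, List.map_cons, List.sum_cons, List.countP_cons] at *
      by_cases hb : 0 ≤ b
      · have h1 : min b x ≤ x := min_le_right b x
        simp only [hb, decide_true, if_true]
        push_cast
        nlinarith
      · have h1 : min b x ≤ 0 := le_trans (min_le_left b x) (by omega)
        simp only [hb, decide_false, Bool.false_eq_true, if_false, Nat.add_zero]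
        omega

theorem pyMinSum_scale (bs : List Int) (hb : ∀ b ∈ bs, 0 ≤ b) {x y : Int}
    (hx : 0 ≤ x) (hxy : x ≤ y) : x * pyMinSum bs y ≤ y * pyMinSum bs x := by
  induction bs with
  | nil => simp [pyMinSum]
  | cons b t ih =>
      have hb0 : 0 ≤ b := hb b (by simp)
      have ht := ih (fun a ha => hb a (by simp [ha]))
      have hel : x * min b y ≤ y * min b x := by
        rcases le_total b x with h1 | h1 <;> rcases le_total b y with h2 | h2 <;>
          simp [h1, h2] <;> nlinarith
      simp only [pyMinSum, List.map_cons, List.sum_cons] at *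
      nlinarith

-- downward closure of the feasibility predicate (on nonnegative charges)
theorem feas_mono (n : Int) (bs : List Int) (hb : ∀ b ∈ bs, 0 ≤ b) {x y : Int}
    (hx : 0 ≤ x) (hxy : x ≤ y) (hy : n * y ≤ pyMinSum bs y) : n * x ≤ pyMinSum bs x := by
  rcases eq_or_lt_of_le (le_trans hx hxy) with h0 | h0
  · have hx0 : x = 0 := le_antisymm (h0 ▸ hxy) hx
    rw [hx0, pyMinSum_zero bs hb]
    simp
  · have h1 : x * (n * y) ≤ x * pyMinSum bs y := by
      exact mul_le_mul_of_nonneg_left hy hx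
    have h2 := pyMinSum_scale bs hb hx hxy
    have h3 : y * (n * x) ≤ y * pyMinSum bs x := by nlinarith
    exact le_of_mul_le_mul_left h3 h0

theorem feas_unique (n : Int) (bs : List Int) (hb : ∀ b ∈ bs, 0 ≤ b) {a c : Int}
    (ha0 : 0 ≤ a) (hPa : n * a ≤ pyMinSum bs a) (hNa : ¬ n * (a + 1) ≤ pyMinSum bs (a + 1))
    (hc0 : 0 ≤ c) (hPc : n * c ≤ pyMinSum bs c) (hNc : ¬ n * (c + 1) ≤ pyMinSum bs (c + 1)) :
    a = c := by
  rcases lt_trichotomy a c with h | h | h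
  · exact absurd (feas_mono n bs hb (by omega) (by omega) hPc) hNa
  · exact h
  · exact absurd (feas_mono n bs hb (by omega) (by omega) hPa) hNc

theorem bsLoop_spec (n : Int) (bs : List Int) :
    ∀ (m : Nat) (l r : Int), (r - l).toNat ≤ m → 0 ≤ l → l ≤ r →
      n * l ≤ pyMinSum bs l → ¬ n * (r + 1) ≤ pyMinSum bs (r + 1) →
      0 ≤ bsLoop n bs l r ∧ n * bsLoop n bs l r ≤ pyMinSum bs (bsLoop n bs l r) ∧
        ¬ n * (bsLoop n bs l r + 1) ≤ pyMinSum bs (bsLoop n bs l r + 1) := by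
  intro m
  induction m with
  | zero =>
      intro l r hm h0 hlr hP hN
      have : l = r := by omega
      subst this
      rw [bsLoop]
      simp only [lt_irrefl, dite_false]
      exact ⟨h0, hP, hN⟩
  | succ m ih =>
      intro l r hm h0 hlr hP hN
      rw [bsLoop]
      by_cases h : l < r
      · simp only [h, dite_true]
        have hx := PySem.Int.floordiv_two_mid_bounds (lo := l + 1) (hi := r) (by omega)
        have he : l + 1 + r = l + r + 1 := by ring
        rw [he] at hx
        set x := PySem.Int.floordiv (l + r + 1) 2 with hxdef
        by_cases hfx : n * x ≤ pyMinSum bs x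
        · simp only [hfx, if_true]
          exact ih x r (by omega) (by omega) (by omega) hfx hN
        · simp only [hfx, if_false]
          have : x - 1 + 1 = x := by ring
          exact ih l (x - 1) (by omega) h0 (by omega) hP (by rw [this]; exact hfx)
      · simp only [h, dite_false]
        have : l = r := by omega
        subst this
        exact ⟨h0, hP, hN⟩

-- A's loop never moves l when every probe above l is infeasible
theorem bsLoop_stay (n : Int) (bs : List Int) :
    ∀ (m : Nat) (l r : Int), (r - l).toNat ≤ m →
      (∀ x, l < x → ¬ n * x ≤ pyMinSum bs x) → bsLoop n bs l r = l := by
  intro m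
  induction m with
  | zero =>
      intro l r hm hN
      rw [bsLoop]
      have : ¬ l < r := by omega
      simp only [this, dite_false]
  | succ m ih =>
      intro l r hm hN
      rw [bsLoop]
      by_cases h : l < r
      · simp only [h, dite_true]
        have hx := PySem.Int.floordiv_two_mid_bounds (lo := l + 1) (hi := r) (by omega)
        have he : l + 1 + r = l + r + 1 := by ring
        rw [he] at hx
        set x := PySem.Int.floordiv (l + r + 1) 2 with hxdef
        have hfx : ¬ n * x ≤ pyMinSum bs x := hN x (by omega)
        simp only [hfx, if_false]
        exact ih l (x - 1) (by omega) hN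
      · simp only [h, dite_false]

-- count and sum of elements strictly above x (proof-only helpers)
def cntGt (x : Int) : List Int → Int
  | [] => 0
  | b :: t => (if x < b then 1 else 0) + cntGt x t

def sumGt (x : Int) : List Int → Int
  | [] => 0
  | b :: t => (if x < b then b else 0) + sumGt x t

theorem cntGt_nonneg (x : Int) (u : List Int) : 0 ≤ cntGt x u := by
  induction u with
  | nil => simp [cntGt]
  | cons b t ih => simp only [cntGt]; split <;> omega

theorem sumGt_le_sum (x : Int) (u : List Int) (hb : ∀ a ∈ u, 0 ≤ a) :
    sumGt x u ≤ u.sum := by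
  induction u with
  | nil => simp [sumGt]
  | cons b t ih =>
      have hb0 : 0 ≤ b := hb b (by simp)
      have ht := ih (fun a ha => hb a (by simp [ha]))
      simp only [sumGt, List.sum_cons]
      split <;> omega

theorem sumGt_le_cnt_mul (x B : Int) (u : List Int) (hB : ∀ a ∈ u, a ≤ B) :
    sumGt x u ≤ cntGt x u * B := by
  induction u with
  | nil => simp [sumGt, cntGt]
  | cons b t ih =>
      have hbB : b ≤ B := hB b (by simp)
      have ht := ih (fun a ha => hB a (by simp [ha]))
      simp only [sumGt, cntGt]
      split <;> nlinarith

theorem pyMinSum_decomp (x : Int) (u : List Int) :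
    pyMinSum u x = cntGt x u * x + (u.sum - sumGt x u) := by
  induction u with
  | nil => simp [pyMinSum, cntGt, sumGt]
  | cons b t ih =>
      simp only [pyMinSum, List.map_cons, List.sum_cons, cntGt, sumGt] at *
      by_cases h : x < b
      · simp only [h, if_true]
        rw [min_eq_right (le_of_lt h)]
        nlinarith
      · simp only [h, if_false]
        rw [min_eq_left (by omega)]
        simp only [zero_add]
        omega

-- the shared-phase lower bound: every element ≤ B, B*k ≤ s, k*x ≤ s ⇒ k*x ≤ Σ min(a,x)
theorem sumMin_lower (u : List Int) (x B k : Int) (hB : ∀ a ∈ u, a ≤ B)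
    (h0 : ∀ a ∈ u, 0 ≤ a) (hx : 0 ≤ x) (hk : 1 ≤ k)
    (hxk : k * x ≤ u.sum) (hBk : B * k ≤ u.sum) : k * x ≤ pyMinSum u x := by
  rw [pyMinSum_decomp]
  set c := cntGt x u with hc
  set G := sumGt x u with hG
  have hc0 : 0 ≤ c := cntGt_nonneg x u
  have hGs : G ≤ u.sum := sumGt_le_sum x u h0
  have hGc : G ≤ c * B := sumGt_le_cnt_mul x B u hB
  rcases le_total c k with hck | hck
  · nlinarith
  · nlinarith

theorem gLoop_spec (t : List Int) : ∀ (s k : Int),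
    t.Pairwise (fun a b => b ≤ a) → (∀ b ∈ t, 0 ≤ b) → s = t.sum → 1 ≤ k →
    0 ≤ gLoop s k t ∧ k * gLoop s k t ≤ pyMinSum t (gLoop s k t) ∧
      pyMinSum t (gLoop s k t + 1) < k * (gLoop s k t + 1) ∧ k * gLoop s k t ≤ s := by
  induction t with
  | nil =>
      intro s k _ _ hs hk
      subst hs
      simp only [List.sum_nil, gLoop]
      have h0 : PySem.Int.floordiv 0 k = 0 := by
        rw [PySem.Int.floordiv_eq_iff_of_pos (by omega)]
        constructor <;> nlinarith
      rw [h0]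
      simp [pyMinSum]
      omega
  | cons b rest ih =>
      intro s k hpw hb hs hk
      have hb0 : 0 ≤ b := hb b (by simp)
      have hrest0 : ∀ a ∈ rest, 0 ≤ a := fun a ha => hb a (by simp [ha])
      have hrestsum : 0 ≤ rest.sum := List.sum_nonneg hrest0
      have hble : ∀ a ∈ rest, a ≤ b := fun a ha => (List.pairwise_cons.mp hpw).1 a ha
      have hssum : s = b + rest.sum := by rw [hs]; simp
      by_cases hcond : 1 < k ∧ s < b * k
      · -- dedicate b to one computer
        obtain ⟨hk2, hbk⟩ := hcond
        have heq : gLoop s k (b :: rest) = gLoop (s - b) (k - 1) rest := by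
          simp [gLoop, hk2, hbk]
        rw [heq]
        obtain ⟨ih0, ih1, ih2, ih3⟩ :=
          ih (s - b) (k - 1) (List.pairwise_cons.mp hpw).2 hrest0 (by omega) (by omega)
        set r := gLoop (s - b) (k - 1) rest with hr
        have hbr : r < b := by nlinarith
        refine ⟨ih0, ?_, ?_, ?_⟩
        · simp only [pyMinSum, List.map_cons, List.sum_cons] at *
          rw [min_eq_right (by omega)]
          nlinarith
        · simp only [pyMinSum, List.map_cons, List.sum_cons] at *
          rw [min_eq_right (by omega)]
          nlinarith
        · nlinarith
      · -- share everything evenly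
        have hcond' : b * k ≤ s := by
          by_cases hbk : s < b * k
          · exfalso
            have hk1 : k = 1 := by omega
            rw [hk1] at hbk
            omega
          · omega
        have heq : gLoop s k (b :: rest) = PySem.Int.floordiv s k := by
          simp only [gLoop, if_neg hcond]
        rw [heq]
        set q := PySem.Int.floordiv s k with hq
        have hbr1 : q * k ≤ s ∧ s < (q + 1) * k := by
          rw [hq]
          exact (PySem.Int.floordiv_eq_iff_of_pos (by omega)).mp rfl
        have hs0 : 0 ≤ s := by rw [hs]; exact List.sum_nonneg hb
        have hq0 : 0 ≤ q := by nlinarith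
        have hBall : ∀ a ∈ b :: rest, a ≤ b := by
          intro a ha
          rcases List.mem_cons.mp ha with h | h
          · omega
          · exact hble a h
        refine ⟨hq0, ?_, ?_, by nlinarith⟩
        · exact sumMin_lower (b :: rest) q b k hBall hb hq0 hk (by nlinarith) (by omega)
        · have := pyMinSum_le_sum (b :: rest) (q + 1)
          have hsum : (b :: rest).sum = s := hs.symm
          nlinarith

-- batteries cannot even sustain one minute: the greedy result is ≤ 0
theorem gLoop_le_zero_of_small : ∀ (t : List Int) (s k : Int), 1 ≤ k → s < k →
    gLoop s k t ≤ 0 := by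
  intro t
  induction t with
  | nil =>
      intro s k hk hs
      have : PySem.Int.floordiv s k < 1 := by
        rw [PySem.Int.floordiv_lt_iff_lt_mul (by omega)]
        omega
      simpa [gLoop] using by omega
  | cons b rest ih =>
      intro s k hk hs
      by_cases hcond : 1 < k ∧ s < b * k
      · obtain ⟨hk2, hbk⟩ := hcond
        have heq : gLoop s k (b :: rest) = gLoop (s - b) (k - 1) rest := by
          simp [gLoop, hk2, hbk]
        rw [heq]
        apply ih (s - b) (k - 1) (by omega)
        rcases le_or_gt 1 b with h1 | h1
        · omega
        · have hbk' : b * k ≤ b := by nlinarith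
          omega
      · have heq : gLoop s k (b :: rest) = PySem.Int.floordiv s k := by
          simp only [gLoop, if_neg hcond]
        rw [heq]
        have : PySem.Int.floordiv s k < 1 := by
          rw [PySem.Int.floordiv_lt_iff_lt_mul (by omega)]
          omega
        omega

theorem sum_nonpos_list (u : List Int) (h : ∀ a ∈ u, a ≤ 0) : u.sum ≤ 0 := by
  induction u with
  | nil => simp
  | cons a t ih =>
      have := h a (by simp)
      have := ih (fun x hx => h x (by simp [hx]))
      simp only [List.sum_cons]
      omega

theorem sum_le_cnt_mul (u : List Int) (B : Int) (hB : ∀ a ∈ u, a ≤ B) :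
    u.sum ≤ (u.countP (fun b => decide (0 ≤ b)) : Int) * B := by
  induction u with
  | nil => simp
  | cons a t ih =>
      have haB : a ≤ B := hB a (by simp)
      have ht := ih (fun x hx => hB x (by simp [hx]))
      simp only [List.sum_cons, List.countP_cons]
      by_cases ha : 0 ≤ a
      · simp only [ha, decide_true, if_true]
        push_cast
        nlinarith
      · simp only [ha, decide_false, Bool.false_eq_true, if_false, Nat.add_zero]
        omega

theorem sum_nonpos_of_cnt_zero (u : List Int)
    (h : u.countP (fun b => decide (0 ≤ b)) = 0) : u.sum ≤ 0 := by
  apply sum_nonpos_list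
  intro a ha
  have := List.countP_eq_zero.mp h a ha
  simp at this
  omega

-- fewer nonnegative batteries than computers: the greedy result is ≤ 0
theorem gLoop_le_zero_of_cnt : ∀ (t : List Int) (s k : Int),
    t.Pairwise (fun a b => b ≤ a) → 1 ≤ k → s = t.sum →
    ((t.countP (fun b => decide (0 ≤ b)) : Int) < k) → gLoop s k t ≤ 0 := by
  intro t
  induction t with
  | nil =>
      intro s k _ hk hs _
      subst hs
      simp only [List.sum_nil, gLoop]
      have : PySem.Int.floordiv 0 k < 1 := by
        rw [PySem.Int.floordiv_lt_iff_lt_mul (by omega)]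
        omega
      omega
  | cons b rest ih =>
      intro s k hpw hk hs hcnt
      have hble : ∀ a ∈ rest, a ≤ b := fun a ha => (List.pairwise_cons.mp hpw).1 a ha
      have hBall : ∀ a ∈ b :: rest, a ≤ b := by
        intro a ha
        rcases List.mem_cons.mp ha with h | h
        · omega
        · exact hble a h
      by_cases hcond : 1 < k ∧ s < b * k
      · obtain ⟨hk2, hbk⟩ := hcond
        have heq : gLoop s k (b :: rest) = gLoop (s - b) (k - 1) rest := by
          simp [gLoop, hk2, hbk]
        rw [heq]
        apply ih (s - b) (k - 1) (List.pairwise_cons.mp hpw).2 (by omega)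
        · rw [hs]; simp
        · by_cases hb : 0 ≤ b
          · simp only [List.countP_cons, hb, decide_true, if_true] at hcnt
            push_cast at hcnt ⊢
            omega
          · have hz : rest.countP (fun b => decide (0 ≤ b)) = 0 := by
              apply List.countP_eq_zero.mpr
              intro a ha
              have := hble a ha
              simp
              omega
            rw [hz]
            push_cast
            omega
      · have heq : gLoop s k (b :: rest) = PySem.Int.floordiv s k := by
          simp only [gLoop, if_neg hcond]
        rw [heq]
        have hs0 : s ≤ 0 := by
          by_cases hk1 : 1 < k
          · have hbk : b * k ≤ s := by
              rcases not_and_or.mp hcond with h | h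
              · omega
              · omega
            by_cases hb : 0 ≤ b
            · have h1 : s ≤ (((b :: rest).countP (fun b => decide (0 ≤ b)) : Int)) * b := by
                rw [hs]
                exact sum_le_cnt_mul (b :: rest) b hBall
              have hb0 : b = 0 := by nlinarith
              rw [hs]
              apply sum_nonpos_list _
              intro a ha
              have := hBall a ha
              omega
            · rw [hs]
              apply sum_nonpos_list _
              intro a ha
              have := hBall a ha
              omega
          · have hk1' : k = 1 := by omega
            have hz : (b :: rest).countP (fun b => decide (0 ≤ b)) = 0 := by
              omega
            rw [hs]
            exact sum_nonpos_of_cnt_zero _ hz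
        have : PySem.Int.floordiv s k < 1 := by
          rw [PySem.Int.floordiv_lt_iff_lt_mul (by omega)]
          omega
        omega

-- ===== VERDICT (by name: the statement is the Claim_ definition above) =====
theorem maxRunTime2_spec : Claim_equal_maxRunTime2 := by
  intro n bs _ hpre
  obtain ⟨hn, hcase⟩ := hpre
  unfold Spec_maxRunTime2 maxRunTime2 maxRunTime2_alt
  set c := PySem.List.sorted bs (fun x => x) true with hc
  have hperm : c.Perm bs := PySem.List.sorted_perm bs (fun x => x) true
  have hcsum : c.sum = bs.sum := hperm.sum_eq
  have hpw : c.Pairwise (fun a b => b ≤ a) := PySem.List.sorted_pairwise_rev bs (fun x => x)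
  set R0 := PySem.Int.floordiv bs.sum n with hR0
  have hbr : R0 * n ≤ bs.sum ∧ bs.sum < (R0 + 1) * n := by
    rw [hR0]
    exact (PySem.Int.floordiv_eq_iff_of_pos (by omega)).mp rfl
  rcases hcase with hb | hsum | hcnt
  · -- all charges nonnegative: both sides compute max{x ≥ 0 : n*x ≤ Σ min(b,x)}
    have hcb : ∀ a ∈ c, 0 ≤ a := fun a ha => hb a (hperm.mem_iff.mp ha)
    obtain ⟨g0, g1, g2, _⟩ := gLoop_spec c bs.sum n hpw hcb hcsum.symm hn
    set g := gLoop bs.sum n c with hg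
    have g1' : n * g ≤ pyMinSum bs g := by rw [← pyMinSum_perm hperm]; exact g1
    have g2' : ¬ n * (g + 1) ≤ pyMinSum bs (g + 1) := by
      rw [← pyMinSum_perm hperm]; omega
    have hs0 : 0 ≤ bs.sum := List.sum_nonneg hb
    have hR00 : 0 ≤ R0 := by nlinarith
    have hP0 : n * 0 ≤ pyMinSum bs 0 := by rw [pyMinSum_zero bs hb]; simp
    have hNR : ¬ n * (R0 + 1) ≤ pyMinSum bs (R0 + 1) := by
      have := pyMinSum_le_sum bs (R0 + 1)
      nlinarith
    obtain ⟨a0, a1, a2⟩ :=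
      bsLoop_spec n bs (R0 - 0).toNat 0 R0 (le_refl _) (le_refl _) hR00 hP0 hNR
    rw [max_eq_left g0]
    exact feas_unique n bs hb a0 a1 a2 g0 g1' g2'
  · -- total charge below n: A's window is empty and B's pool stays below k
    have hR0le : R0 ≤ 0 := by
      have : R0 < 1 := by
        rw [hR0, PySem.Int.floordiv_lt_iff_lt_mul (by omega)]
        omega
      omega
    have hA : bsLoop n bs 0 R0 = 0 := by
      rw [bsLoop]
      have : ¬ (0 : Int) < R0 := by omega
      simp only [this, dite_false]
    have hB : gLoop bs.sum n c ≤ 0 := gLoop_le_zero_of_small c bs.sum n hn hsum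
    rw [hA, max_eq_right hB]
  · -- fewer nonnegative batteries than computers: no positive x is feasible
    have hA : bsLoop n bs 0 R0 = 0 := by
      apply bsLoop_stay n bs (R0 - 0).toNat 0 R0 (le_refl _)
      intro x hx hP
      have h1 := pyMinSum_le_cnt_mul bs x
      nlinarith
    have hccnt : (c.countP (fun b => decide (0 ≤ b)) : Int) < n := by
      rw [hperm.countP_eq]
      exact hcnt
    have hB : gLoop bs.sum n c ≤ 0 :=
      gLoop_le_zero_of_cnt c bs.sum n hpw hn hcsum.symm hccnt
    rw [hA, max_eq_right hB]
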